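-- pv_equiv track=rewrite | github.com/ShajahanAI/codewars | python/7 kyu/111.py | distribution_of
-- ===== SOURCE A (Python) =====
-- def distribution_of(golds):
--     a_b_holdings = [0, 0]
--     idx = 0
--     while golds:
--         gold_amt = max(golds[0], golds[-1])
--         if golds[0] == gold_amt:
--             del golds[0]
--         else:
--             del golds[-1]
--
--         a_b_holdings[idx] += gold_amt
--         idx = -1 if idx == 0 else 0
--
--     return a_b_holdings
-- ===== SOURCE B (Python) =====
-- def distribution_of(golds):
--     # Two pointers from both ends; O(n), no list mutation.
--     i, j = 0, len(golds) - 1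
--     holdings = [0, 0]
--     turn = 0
--     while i <= j:
--         if golds[i] >= golds[j]:
--             holdings[turn] += golds[i]
--             i += 1
--         else:
--             holdings[turn] += golds[j]
--             j -= 1
--         turn = 1 - turn
--     return holdings
-- ===== Notes on version B (the rewrite author's own statement) =====
-- stated objective: faster
-- what changed: Replaces the destructive while-loop that deletes from the front/back of the list (each front deletion is O(n)) with two index pointers moving inward over the untouched list.
import Mathlib
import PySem

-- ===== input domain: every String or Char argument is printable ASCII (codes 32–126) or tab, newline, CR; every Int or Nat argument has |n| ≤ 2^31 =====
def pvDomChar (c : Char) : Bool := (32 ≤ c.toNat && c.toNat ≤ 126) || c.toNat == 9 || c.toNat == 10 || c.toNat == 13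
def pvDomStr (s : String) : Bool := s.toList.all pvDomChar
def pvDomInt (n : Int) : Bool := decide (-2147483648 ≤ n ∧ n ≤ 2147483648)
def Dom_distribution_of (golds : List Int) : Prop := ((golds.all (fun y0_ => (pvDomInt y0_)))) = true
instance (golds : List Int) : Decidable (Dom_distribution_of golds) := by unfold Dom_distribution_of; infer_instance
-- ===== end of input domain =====

-- B replaces A's destructive del-from-front/back loop with two index pointers over the
-- untouched list (A mutates its argument in place, emptying it; the equivalence proved
-- here is about the return value only — B does not mutate).

-- ===== PORT A =====
-- A's while loop: take max of first/last element, delete it, add to player idx (0 or -1).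
def distALoop : List Int → Int → Int → Int → Int × Int
  | [], h0, h1, _ => (h0, h1)
  | g :: rest, h0, h1, idx =>
    let amt := max g ((g :: rest).getLastD 0)  -- golds[-1]; list is nonempty here
    let h0' := if idx = 0 then h0 + amt else h0
    let h1' := if idx = 0 then h1 else h1 + amt
    let idx' : Int := if idx = 0 then -1 else 0
    if g = amt then distALoop rest h0' h1' idx'
    else distALoop ((g :: rest).dropLast) h0' h1' idx'
  termination_by golds _ _ _ => golds.length
  decreasing_by
    · simp
    · simp [List.length_dropLast]

def distribution_of (golds : List Int) : List Int :=
  let p := distALoop golds 0 0 0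
  [p.1, p.2]

-- ===== PORT B =====
-- B's while loop: two pointers i, j; take the larger end, move the pointer inward.
def distBLoop (golds : List Int) (i j h0 h1 turn : Int) : Int × Int :=
  if i ≤ j then
    let gi := golds.getD i.toNat 0
    let gj := golds.getD j.toNat 0
    if gi ≥ gj then
      distBLoop golds (i + 1) j
        (if turn = 0 then h0 + gi else h0) (if turn = 0 then h1 else h1 + gi) (1 - turn)
    else
      distBLoop golds i (j - 1)
        (if turn = 0 then h0 + gj else h0) (if turn = 0 then h1 else h1 + gj) (1 - turn)
  else (h0, h1)
  termination_by (j + 1 - i).toNat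
  decreasing_by
    · omega
    · omega

def distribution_of_alt (golds : List Int) : List Int :=
  let p := distBLoop golds 0 ((golds.length : Int) - 1) 0 0 0
  [p.1, p.2]

-- ===== PRECONDITION & SPEC =====
def Spec_distribution_of (golds : List Int) (out : List Int) : Prop := out = distribution_of_alt golds
instance (golds : List Int) (out : List Int) : Decidable (Spec_distribution_of golds out) := by unfold Spec_distribution_of; infer_instance

-- ===== CLAIM (what is proved, stated in full; the proofs are below) =====
def Claim_equal_distribution_of : Prop := ∀ (golds : List Int), Dom_distribution_of golds → Spec_distribution_of golds (distribution_of golds)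

-- ===== LEMMAS AND PROOFS =====

-- the window golds[i .. i+n-1] that A's shrinking list corresponds to
def pvWindow (l : List Int) (i n : Nat) : List Int :=
  (List.range' i n).map (fun k => l.getD k 0)

theorem pvWindow_zero (l : List Int) (i : Nat) : pvWindow l i 0 = [] := rfl

theorem pvWindow_cons (l : List Int) (i n : Nat) :
    pvWindow l i (n + 1) = l.getD i 0 :: pvWindow l (i + 1) n := by
  simp [pvWindow, List.range'_succ]

theorem pvWindow_concat (l : List Int) (i n : Nat) :
    pvWindow l i (n + 1) = pvWindow l i n ++ [l.getD (i + n) 0] := by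
  simp [pvWindow, List.range'_concat]

theorem pvWindow_dropLast (l : List Int) (i n : Nat) :
    (pvWindow l i (n + 1)).dropLast = pvWindow l i n := by
  rw [pvWindow_concat]; simp

theorem pvWindow_getLastD (l : List Int) (i n : Nat) :
    (pvWindow l i (n + 1)).getLastD 0 = l.getD (i + n) 0 := by
  rw [pvWindow_concat]; simp

theorem pvWindow_full (l : List Int) : pvWindow l 0 l.length = l := by
  apply List.ext_getElem
  · simp [pvWindow]
  · intro k h1 h2
    simp [pvWindow, List.getD_eq_getElem?_getD,
      (by simpa [pvWindow] using h2 : k < l.length)]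

-- the loops compute the same pair on the same window
theorem loop_eq (n : Nat) (l : List Int) (i j h0 h1 idx turn : Int)
    (hi : 0 ≤ i) (hn : (j + 1 - i).toNat = n)
    (ht : (idx = 0 ∧ turn = 0) ∨ (idx = -1 ∧ turn = 1)) :
    distALoop (pvWindow l i.toNat n) h0 h1 idx = distBLoop l i j h0 h1 turn := by
  induction n generalizing i j h0 h1 idx turn with
  | zero =>
    rw [pvWindow_zero, distALoop, distBLoop]
    simp only [if_neg (by omega : ¬ i ≤ j)]
  | succ n ih =>
    have hij : i ≤ j := by omega
    have hj0 : 0 ≤ j := by omega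
    have hjn : j.toNat = i.toNat + n := by omega
    rw [pvWindow_cons, distALoop, distBLoop]
    simp only [if_pos hij]
    have hlast : ((l.getD i.toNat 0 :: pvWindow l (i.toNat + 1) n).getLastD 0)
        = l.getD j.toNat 0 := by
      rw [← pvWindow_cons, pvWindow_getLastD, hjn]
    rw [hlast]
    set gi := l.getD i.toNat 0 with hgi
    set gj := l.getD j.toNat 0 with hgj
    by_cases hge : gi ≥ gj
    · have hmax : max gi gj = gi := by omega
      rw [hmax]
      simp only [if_pos hge]
      have hrec : pvWindow l (i.toNat + 1) n = pvWindow l (i + 1).toNat n := by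
        congr 1; omega
      rw [hrec]
      rcases ht with ⟨hi0, ht0⟩ | ⟨hi1, ht1⟩
      · subst hi0; subst ht0
        simpa using ih (i + 1) j (h0 + gi) h1 (-1) 1 (by omega) (by omega) (by tauto)
      · subst hi1; subst ht1
        simpa using ih (i + 1) j h0 (h1 + gi) 0 0 (by omega) (by omega) (by tauto)
    · have hmax : max gi gj = gj := by omega
      rw [hmax]
      simp only [if_neg (by omega : ¬ gi = gj), if_neg hge]
      have hdrop : (gi :: pvWindow l (i.toNat + 1) n).dropLast = pvWindow l i.toNat n := by
        rw [hgi, ← pvWindow_cons, pvWindow_dropLast]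
      rw [hdrop]
      rcases ht with ⟨hi0, ht0⟩ | ⟨hi1, ht1⟩
      · subst hi0; subst ht0
        simpa using ih i (j - 1) (h0 + gj) h1 (-1) 1 hi (by omega) (by tauto)
      · subst hi1; subst ht1
        simpa using ih i (j - 1) h0 (h1 + gj) 0 0 hi (by omega) (by tauto)

-- ===== VERDICT (by name: the statement is the Claim_ definition above) =====
theorem distribution_of_spec : Claim_equal_distribution_of := by
  intro golds _
  unfold Spec_distribution_of distribution_of distribution_of_alt
  have h := loop_eq golds.length golds 0 ((golds.length : Int) - 1) 0 0 0 0
    (le_refl 0) (by omega) (Or.inl ⟨rfl, rfl⟩)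
  rw [← h]
  simp [pvWindow_full]
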